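-- pv_equiv track=rewrite | github.com/dare2live/chunky-monkey-v2 | backend/routers/updater.py | _collect_downstream_steps
-- ===== SOURCE A (Python) =====
-- STEPS = [
--     {"id": "sync_raw",              "name": "下载十大股东",     "group": "data", "order": 1},
--     {"id": "match_inst",            "name": "匹配跟踪机构",    "group": "data", "order": 2},
--     {"id": "sync_market_data",      "name": "同步行情数据",    "group": "data", "order": 3},
--     {"id": "sync_financial",        "name": "同步财务数据",    "group": "data", "order": 4},
--     {"id": "gen_events",            "name": "生成事件",        "group": "calc", "order": 5},
--     {"id": "calc_returns",          "name": "计算收益",        "group": "calc", "order": 6},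
--     {"id": "sync_industry",         "name": "申万行业",        "group": "data", "order": 7},
--     {"id": "calc_financial_derived","name": "计算财务指标",    "group": "calc", "order": 8},
--     {"id": "build_current_rel",     "name": "构建当前关系",    "group": "mart", "order": 9},
--     {"id": "build_profiles",        "name": "机构画像",        "group": "mart", "order": 10},
--     {"id": "build_industry_stat",   "name": "行业统计",        "group": "mart", "order": 11},
--     {"id": "build_trends",          "name": "生成股票列表",    "group": "mart", "order": 12},
--     {"id": "calc_screening",        "name": "TDX选股筛选",     "group": "mart", "order": 13},
--     {"id": "calc_sector_momentum",  "name": "板块动量分析",    "group": "mart", "order": 14},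
--     {"id": "build_stage_features",  "name": "阶段特征构建",    "group": "mart", "order": 15},
--     {"id": "build_forecast_features","name": "预测特征构建",   "group": "mart", "order": 16},
--     {"id": "calc_inst_scores",      "name": "机构评分",        "group": "mart", "order": 17},
--     {"id": "calc_stock_scores",     "name": "股票评分",        "group": "mart", "order": 18},
-- ]
--
-- HARD_DEPS = {
--     "sync_raw": [],
--     "match_inst": ["sync_raw"],
--     "sync_market_data": ["match_inst"],
--     "sync_financial": [],
--     "gen_events": ["match_inst"],
--     "calc_returns": ["gen_events"],
--     "sync_industry": ["match_inst"],
--     "calc_financial_derived": ["sync_financial"],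
--     "build_current_rel": ["gen_events"],
--     "build_profiles": ["build_current_rel"],
--     "build_industry_stat": ["build_current_rel"],
--     "build_trends": ["build_current_rel"],
--     "calc_screening": ["sync_market_data"],
--     "calc_sector_momentum": ["sync_market_data", "sync_industry"],
--     "build_stage_features": ["build_trends", "calc_sector_momentum"],
--     "build_forecast_features": ["build_stage_features"],
--     "calc_inst_scores": ["build_profiles", "build_industry_stat"],
--     "calc_stock_scores": ["calc_inst_scores", "build_stage_features", "build_forecast_features"],
-- }
--
-- SOFT_DEPS = {
--     "calc_returns": ["sync_market_data"],
--     "build_current_rel": ["calc_returns", "sync_industry"],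
--     "build_profiles": ["calc_returns"],
--     "build_industry_stat": ["calc_returns", "sync_industry"],
--     "build_trends": ["calc_returns", "sync_industry"],
--     "calc_screening": ["calc_financial_derived"],
--     "calc_sector_momentum": ["build_trends"],
--     "build_stage_features": ["calc_financial_derived"],
--     "build_forecast_features": [],
--     "calc_inst_scores": ["calc_returns"],
--     "calc_stock_scores": ["calc_returns", "calc_screening"],
-- }
--
-- def _collect_downstream_steps(start_step_id):
--     """返回包含自身在内、受该步骤影响的下游步骤（按 DAG 顺序）"""
--     valid_ids = {s["id"] for s in STEPS}
--     reverse = {sid: set() for sid in valid_ids}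
--     for child, deps in HARD_DEPS.items():
--         for dep in deps:
--             if dep in valid_ids and child in valid_ids:
--                 reverse[dep].add(child)
--     for child, deps in SOFT_DEPS.items():
--         for dep in deps:
--             if dep in valid_ids and child in valid_ids:
--                 reverse[dep].add(child)
--
--     seen = {start_step_id}
--     queue = [start_step_id]
--     while queue:
--         current = queue.pop(0)
--         for nxt in reverse.get(current, set()):
--             if nxt not in seen:
--                 seen.add(nxt)
--                 queue.append(nxt)
--
--     return [s["id"] for s in STEPS if s["id"] in seen]
-- ===== SOURCE B (Python) =====
-- # Forward propagation over the topologically ordered step list, using a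
-- # precomputed index-based dependency table (hard+soft deps merged, by STEPS
-- # position) and a boolean mask instead of a reverse-adjacency dict + BFS queue.
--
-- _IDS = [
--     "sync_raw", "match_inst", "sync_market_data", "sync_financial",
--     "gen_events", "calc_returns", "sync_industry", "calc_financial_derived",
--     "build_current_rel", "build_profiles", "build_industry_stat",
--     "build_trends", "calc_screening", "calc_sector_momentum",
--     "build_stage_features", "build_forecast_features", "calc_inst_scores",
--     "calc_stock_scores",
-- ]
--
-- # _DEPS[i] = indices into _IDS of HARD_DEPS[_IDS[i]] + SOFT_DEPS[_IDS[i]]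
-- _DEPS = [
--     [], [0], [1], [], [1], [4, 2], [1], [3],
--     [4, 5, 6], [8, 5], [8, 5, 6], [8, 5, 6], [2, 7], [2, 6, 11],
--     [11, 13, 7], [14], [9, 10, 5], [16, 14, 15, 5, 12],
-- ]
--
-- def _collect_downstream_steps(start_step_id):
--     """STEPS is topologically ordered, so one forward pass over the mask
--     suffices: step i is affected iff it is the start step or one of its
--     (hard or soft) dependencies is already affected."""
--     mask = [sid == start_step_id for sid in _IDS]
--     for i in range(len(_IDS)):
--         if not mask[i] and any(mask[j] for j in _DEPS[i]):
--             mask[i] = True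
--     return [sid for sid, m in zip(_IDS, mask) if m]
-- ===== Notes on version B (the rewrite author's own statement) =====
-- stated objective: simpler
-- what changed: Replaces A's reverse-adjacency dict construction plus BFS queue over string sets with a single forward pass over a precomputed index-based dependency table (hard+soft deps merged, indices into the topologically ordered step list) updating a boolean mask.
import Mathlib
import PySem

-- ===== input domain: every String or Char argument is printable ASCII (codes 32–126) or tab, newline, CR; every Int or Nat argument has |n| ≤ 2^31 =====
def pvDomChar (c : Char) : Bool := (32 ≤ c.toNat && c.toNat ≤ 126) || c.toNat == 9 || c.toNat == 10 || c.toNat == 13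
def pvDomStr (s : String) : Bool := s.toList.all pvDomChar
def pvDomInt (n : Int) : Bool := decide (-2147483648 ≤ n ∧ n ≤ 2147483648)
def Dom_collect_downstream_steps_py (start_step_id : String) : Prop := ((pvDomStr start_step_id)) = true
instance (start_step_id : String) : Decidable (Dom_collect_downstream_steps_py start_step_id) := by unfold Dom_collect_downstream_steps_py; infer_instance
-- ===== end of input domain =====

-- B replaces A's reverse-adjacency construction + BFS over string sets with one forward pass
-- over a precomputed index-based dependency table and a boolean mask (objective: simpler);
-- same return value on every input.


-- ===== PORT A =====
-- STEPS: each dict {"id", "name", "group", "order"} is a 4-tuple (id, name, group, order)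
def pvSTEPS : List (String × String × String × Int) :=
  [("sync_raw", "下载十大股东", "data", 1),
   ("match_inst", "匹配跟踪机构", "data", 2),
   ("sync_market_data", "同步行情数据", "data", 3),
   ("sync_financial", "同步财务数据", "data", 4),
   ("gen_events", "生成事件", "calc", 5),
   ("calc_returns", "计算收益", "calc", 6),
   ("sync_industry", "申万行业", "data", 7),
   ("calc_financial_derived", "计算财务指标", "calc", 8),
   ("build_current_rel", "构建当前关系", "mart", 9),
   ("build_profiles", "机构画像", "mart", 10),
   ("build_industry_stat", "行业统计", "mart", 11),
   ("build_trends", "生成股票列表", "mart", 12),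
   ("calc_screening", "TDX选股筛选", "mart", 13),
   ("calc_sector_momentum", "板块动量分析", "mart", 14),
   ("build_stage_features", "阶段特征构建", "mart", 15),
   ("build_forecast_features", "预测特征构建", "mart", 16),
   ("calc_inst_scores", "机构评分", "mart", 17),
   ("calc_stock_scores", "股票评分", "mart", 18)]

def pvHARD_DEPS : PySem.Dict String (List String) := PySem.Dict.ofList
  [("sync_raw", []),
   ("match_inst", ["sync_raw"]),
   ("sync_market_data", ["match_inst"]),
   ("sync_financial", []),
   ("gen_events", ["match_inst"]),
   ("calc_returns", ["gen_events"]),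
   ("sync_industry", ["match_inst"]),
   ("calc_financial_derived", ["sync_financial"]),
   ("build_current_rel", ["gen_events"]),
   ("build_profiles", ["build_current_rel"]),
   ("build_industry_stat", ["build_current_rel"]),
   ("build_trends", ["build_current_rel"]),
   ("calc_screening", ["sync_market_data"]),
   ("calc_sector_momentum", ["sync_market_data", "sync_industry"]),
   ("build_stage_features", ["build_trends", "calc_sector_momentum"]),
   ("build_forecast_features", ["build_stage_features"]),
   ("calc_inst_scores", ["build_profiles", "build_industry_stat"]),
   ("calc_stock_scores", ["calc_inst_scores", "build_stage_features", "build_forecast_features"])]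

def pvSOFT_DEPS : PySem.Dict String (List String) := PySem.Dict.ofList
  [("calc_returns", ["sync_market_data"]),
   ("build_current_rel", ["calc_returns", "sync_industry"]),
   ("build_profiles", ["calc_returns"]),
   ("build_industry_stat", ["calc_returns", "sync_industry"]),
   ("build_trends", ["calc_returns", "sync_industry"]),
   ("calc_screening", ["calc_financial_derived"]),
   ("calc_sector_momentum", ["build_trends"]),
   ("build_stage_features", ["calc_financial_derived"]),
   ("build_forecast_features", []),
   ("calc_inst_scores", ["calc_returns"]),
   ("calc_stock_scores", ["calc_returns", "calc_screening"])]

-- the BFS while-loop of A; fuel is only a termination guard (each node is enqueued at most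
-- once, so at most 1 + 18 pops ever happen; fuel 64 is never exhausted)
def pvBfsA (fuel : Nat) (reverse : PySem.Dict String (PySem.Set String))
    (seen : PySem.Set String) (queue : List String) : PySem.Set String :=
  match fuel with
  | 0 => seen
  | f + 1 =>
    match queue with
    | [] => seen
    | current :: rest =>          -- current = queue.pop(0)
      let p := (reverse.getD current PySem.Set.empty).foldl
        (fun (p : PySem.Set String × List String) nxt =>
          if PySem.Set.contains p.1 nxt then p else (PySem.Set.add p.1 nxt, p.2 ++ [nxt]))
        (seen, rest)
      pvBfsA f reverse p.1 p.2

-- valid_ids = {s["id"] for s in STEPS} (input-independent, hoisted as a helper)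
def pvValidIds : PySem.Set String := PySem.Set.ofList (pvSTEPS.map (·.1))

-- reverse = the reverse-adjacency dict A builds (input-independent, hoisted as a helper;
-- built by exactly A's three loops)
def pvReverse : PySem.Dict String (PySem.Set String) :=
  let reverse0 : PySem.Dict String (PySem.Set String) :=
    pvValidIds.foldl (fun d sid => d.insert sid PySem.Set.empty) PySem.Dict.empty
  let reverse1 := pvHARD_DEPS.items.foldl (fun d cd =>
    cd.2.foldl (fun d dep =>
      if pvValidIds.contains dep && pvValidIds.contains cd.1
      then d.modify dep PySem.Set.empty (fun s => PySem.Set.add s cd.1) else d) d) reverse0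
  pvSOFT_DEPS.items.foldl (fun d cd =>
    cd.2.foldl (fun d dep =>
      if pvValidIds.contains dep && pvValidIds.contains cd.1
      then d.modify dep PySem.Set.empty (fun s => PySem.Set.add s cd.1) else d) d) reverse1

def collect_downstream_steps_py (start_step_id : String) : List String :=
  let seen := pvBfsA 64 pvReverse (PySem.Set.ofList [start_step_id]) [start_step_id]
  (pvSTEPS.filter (fun s => seen.contains s.1)).map (·.1)

-- ===== PORT B =====
-- _IDS: the step ids in STEPS (topological) order
def pvIDS : List String :=
  ["sync_raw", "match_inst", "sync_market_data", "sync_financial",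
   "gen_events", "calc_returns", "sync_industry", "calc_financial_derived",
   "build_current_rel", "build_profiles", "build_industry_stat",
   "build_trends", "calc_screening", "calc_sector_momentum",
   "build_stage_features", "build_forecast_features", "calc_inst_scores",
   "calc_stock_scores"]

-- _DEPS[i] = indices into _IDS of HARD_DEPS[_IDS[i]] + SOFT_DEPS[_IDS[i]]
def pvDEPS : List (List Nat) :=
  [[], [0], [1], [], [1], [4, 2], [1], [3],
   [4, 5, 6], [8, 5], [8, 5, 6], [8, 5, 6], [2, 7], [2, 6, 11],
   [11, 13, 7], [14], [9, 10, 5], [16, 14, 15, 5, 12]]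

def collect_downstream_steps_py_alt (start_step_id : String) : List String :=
  let mask0 := pvIDS.map (fun sid => sid == start_step_id)
  let mask := (List.range pvIDS.length).foldl
    (fun (m : List Bool) i =>
      if !(m.getD i false) && ((pvDEPS.getD i []).any (fun j => m.getD j false))
      then m.set i true else m) mask0
  ((pvIDS.zip mask).filter (·.2)).map (·.1)

-- ===== PRECONDITION & SPEC =====
def Spec_collect_downstream_steps_py (start_step_id : String) (out : List String) : Prop := out = collect_downstream_steps_py_alt start_step_id
instance (start_step_id : String) (out : List String) : Decidable (Spec_collect_downstream_steps_py start_step_id out) := by unfold Spec_collect_downstream_steps_py; infer_instance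

-- ===== CLAIM (what is proved, stated in full; the proofs are below) =====
def Claim_equal_collect_downstream_steps_py : Prop := ∀ (start_step_id : String), Dom_collect_downstream_steps_py start_step_id → Spec_collect_downstream_steps_py start_step_id (collect_downstream_steps_py start_step_id)

-- ===== LEMMAS AND PROOFS =====
-- the keys of the reverse dict are exactly the 18 step ids (a closed computation)
set_option maxRecDepth 100000 in
theorem pv_reverse_keys : pvReverse.keys = pvSTEPS.map (·.1) := by decide

-- with two units of fuel, a BFS from a node with no reverse edges returns `seen` unchanged
theorem pvBfsA_stuck (f : Nat) (rev : PySem.Dict String (PySem.Set String))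
    (seen : PySem.Set String) (s : String)
    (h : rev.getD s [] = []) :
    pvBfsA (f + 2) rev seen [s] = seen := by
  simp [pvBfsA, h]

-- for a string that is not a step id, both sides return []
theorem pv_unknown (s : String) (h : s ∉ pvSTEPS.map (·.1)) :
    collect_downstream_steps_py s = collect_downstream_steps_py_alt s := by
  simp only [pvSTEPS, List.map_cons, List.map_nil, List.mem_cons, not_or] at h
  obtain ⟨h1, h2, h3, h4, h5, h6, h7, h8, h9, h10, h11, h12, h13, h14, h15, h16, h17, h18, -⟩ := h
  have hrev : pvReverse.getD s [] = [] := by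
    apply PySem.Dict.getD_of_not_contains
    rw [PySem.Dict.contains_eq_decide_mem_keys, pv_reverse_keys]
    simp only [pvSTEPS, List.map_cons, List.map_nil, List.mem_cons, List.not_mem_nil,
      or_false, not_or, decide_eq_false_iff_not]
    exact ⟨h1, h2, h3, h4, h5, h6, h7, h8, h9, h10, h11, h12, h13, h14, h15, h16, h17, h18⟩
  have hA : collect_downstream_steps_py s = [] := by
    simp only [collect_downstream_steps_py]
    rw [show (64 : Nat) = 62 + 2 from rfl, pvBfsA_stuck 62 _ _ _ hrev]
    simp [pvSTEPS, PySem.Set.contains, PySem.Set.ofList,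
      Ne.symm h1, Ne.symm h2, Ne.symm h3, Ne.symm h4, Ne.symm h5, Ne.symm h6,
      Ne.symm h7, Ne.symm h8, Ne.symm h9, Ne.symm h10, Ne.symm h11, Ne.symm h12,
      Ne.symm h13, Ne.symm h14, Ne.symm h15, Ne.symm h16, Ne.symm h17, Ne.symm h18]
  have hm : pvIDS.map (fun sid => sid == s) = List.replicate 18 false := by
    simp [pvIDS, List.replicate, beq_eq_false_iff_ne,
      Ne.symm h1, Ne.symm h2, Ne.symm h3, Ne.symm h4, Ne.symm h5, Ne.symm h6,
      Ne.symm h7, Ne.symm h8, Ne.symm h9, Ne.symm h10, Ne.symm h11, Ne.symm h12,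
      Ne.symm h13, Ne.symm h14, Ne.symm h15, Ne.symm h16, Ne.symm h17, Ne.symm h18]
  have hB : collect_downstream_steps_py_alt s = [] := by
    simp only [collect_downstream_steps_py_alt]
    rw [hm]
    decide
  rw [hA, hB]

-- ===== VERDICT (by name: the statement is the Claim_ definition above) =====
set_option maxRecDepth 100000 in
theorem collect_downstream_steps_py_spec : Claim_equal_collect_downstream_steps_py := by
  intro s _
  unfold Spec_collect_downstream_steps_py
  by_cases h : s ∈ pvSTEPS.map (·.1)
  · simp [pvSTEPS] at h
    rcases h with h|h|h|h|h|h|h|h|h|h|h|h|h|h|h|h|h|h <;> subst h <;> decide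
  · exact pv_unknown s h
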